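-- pv_equiv track=rewrite | github.com/RBVI/ChimeraX | src/bundles/aniso/src/cmd.py | get_preset_name
-- ===== SOURCE A (Python) =====
-- def get_preset_name(presets, name):
--     matches = []
--     name = name.lower()
--     for preset_name in presets.keys():
--         pname = preset_name.lower()
--         if name == pname:
--             return [preset_name]
--         if pname.startswith(name):
--             matches.append(preset_name)
--     return matches
-- ===== SOURCE B (Python) =====
-- def get_preset_name(presets, name):
--     nl = name.lower()
--     exact = next((k for k in presets.keys() if k.lower() == nl), None)
--     if exact is not None:
--         return [exact]
--     return [k for k in presets.keys() if k.lower().startswith(nl)]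
-- ===== Notes on version B (the rewrite author's own statement) =====
-- stated objective: simpler
-- what changed: Replaces the single interleaved loop with early return and an accumulator by two separate passes: a next() search for the first exact lowercase match, then a list comprehension of prefix matches only when no exact match exists.
import Mathlib
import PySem

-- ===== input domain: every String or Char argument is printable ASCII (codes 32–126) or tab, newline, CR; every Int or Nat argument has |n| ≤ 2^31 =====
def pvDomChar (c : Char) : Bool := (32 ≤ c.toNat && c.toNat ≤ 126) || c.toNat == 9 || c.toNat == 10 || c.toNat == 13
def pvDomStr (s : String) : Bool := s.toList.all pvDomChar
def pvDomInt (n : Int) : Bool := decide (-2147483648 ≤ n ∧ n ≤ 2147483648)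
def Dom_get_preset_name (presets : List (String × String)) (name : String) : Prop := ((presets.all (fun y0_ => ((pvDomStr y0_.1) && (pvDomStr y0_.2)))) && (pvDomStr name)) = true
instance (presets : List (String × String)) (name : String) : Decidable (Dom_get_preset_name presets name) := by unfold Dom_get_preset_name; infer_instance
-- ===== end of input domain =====

-- B replaces A's single interleaved loop (early return + accumulator) by two separate
-- passes: find the first exact lowercase match, else collect the prefix acc0. Simpler.

-- ===== PORT A =====
-- A's loop: carries the `acc0` accumulator, returns [preset_name] on exact match.
def get_preset_name_loop (nl : String) : List (String × String) → List String → List String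
  | [], acc0 => acc0
  | (preset_name, _) :: rest, acc0 =>
    let pname := PySem.Str.lower preset_name
    if nl == pname then [preset_name]
    else if PySem.Str.startswith pname nl then
      get_preset_name_loop nl rest (acc0 ++ [preset_name])
    else
      get_preset_name_loop nl rest acc0

def get_preset_name (presets : List (String × String)) (name : String) : List String :=
  get_preset_name_loop (PySem.Str.lower name) presets []

-- ===== PORT B =====
def get_preset_name_alt (presets : List (String × String)) (name : String) : List String :=
  let nl := PySem.Str.lower name
  match presets.find? (fun kv => PySem.Str.lower kv.1 == nl) with
  | some kv => [kv.1]
  | none => (presets.filter (fun kv => PySem.Str.startswith (PySem.Str.lower kv.1) nl)).map Prod.fst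

-- ===== PRECONDITION & SPEC =====
def Spec_get_preset_name (presets : List (String × String)) (name : String) (out : List String) : Prop := out = get_preset_name_alt presets name
instance (presets : List (String × String)) (name : String) (out : List String) : Decidable (Spec_get_preset_name presets name out) := by unfold Spec_get_preset_name; infer_instance

-- ===== CLAIM (what is proved, stated in full; the proofs are below) =====
def Claim_equal_get_preset_name : Prop := ∀ (presets : List (String × String)) (name : String), Dom_get_preset_name presets name → Spec_get_preset_name presets name (get_preset_name presets name)

-- ===== LEMMAS AND PROOFS =====
theorem get_preset_name_loop_eq (nl : String) (l : List (String × String)) (acc : List String) :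
    get_preset_name_loop nl l acc =
      match l.find? (fun kv => PySem.Str.lower kv.1 == nl) with
      | some kv => [kv.1]
      | none => acc ++ (l.filter (fun kv => PySem.Str.startswith (PySem.Str.lower kv.1) nl)).map Prod.fst := by
  induction l generalizing acc with
  | nil => simp [get_preset_name_loop]
  | cons hd tl ih =>
    obtain ⟨k, v⟩ := hd
    simp only [get_preset_name_loop, List.find?_cons, List.filter_cons]
    by_cases h : nl = PySem.Str.lower k
    · have h1 : (nl == PySem.Str.lower k) = true := beq_iff_eq.mpr h
      have h2 : (PySem.Str.lower k == nl) = true := beq_iff_eq.mpr h.symm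
      simp only [h1, h2, if_true]
    · have h1 : (nl == PySem.Str.lower k) = false := beq_eq_false_iff_ne.mpr h
      have h2 : (PySem.Str.lower k == nl) = false := beq_eq_false_iff_ne.mpr (fun e => h e.symm)
      simp only [h1, h2, Bool.false_eq_true, if_false]
      by_cases hs : PySem.Str.startswith (PySem.Str.lower k) nl = true
      · simp only [hs, if_true, ih]
        cases tl.find? (fun kv => PySem.Str.lower kv.1 == nl) <;> simp
      · simp only [hs, Bool.false_eq_true, if_false, ih]

theorem get_preset_name_spec : Claim_equal_get_preset_name := by
  intro presets name _
  unfold Spec_get_preset_name get_preset_name get_preset_name_alt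
  simpa using get_preset_name_loop_eq (PySem.Str.lower name) presets []
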